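-- pv_equiv track=rewrite | github.com/wooktori/algorithm | 프로그래머스/python/LV2/퍼즐 게임 챌린지.py | solution
-- ===== SOURCE A (Python) =====
-- def solution(diffs, times, limit):
--     answer = 0
--     start_level = 1
--     end_level = max(diffs)
--
--     while start_level <= end_level:
--         level = (start_level + end_level) // 2
--         total_time = 0
--         for i in range(len(diffs)):
--             temp = diffs[i] - level
--             total_time += times[i]
--             if temp > 0:
--                 total_time += (times[i - 1] + times[i]) * temp
--
--         if total_time <= limit:
--             end_level = level - 1
--             answer = level
--         else:
--             start_level = level + 1
--     return answer
-- ===== SOURCE B (Python) =====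
-- def solution(diffs, times, limit):
--     n = len(diffs)
--     end_level = max(diffs)
--     base = sum(times[:n])
--     # weight of puzzle i: times[i-1] + times[i] (Python wraparound: times[-1] for i == 0)
--     pairs = sorted(((diffs[i], times[i - 1] + times[i]) for i in range(n)),
--                    key=lambda p: p[0], reverse=True)
--     ds = [d for d, _ in pairs]
--     w_pref = prefix_sums([w for _, w in pairs])
--     wd_pref = prefix_sums([d * w for d, w in pairs])
--
--     def count_gt(level):
--         # number of entries of ds (sorted descending) strictly greater than level
--         lo, hi = 0, n
--         while lo < hi:
--             mid = (lo + hi) // 2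
--             if ds[mid] > level:
--                 lo = mid + 1
--             else:
--                 hi = mid
--         return lo
--
--     def total_time(level):
--         k = count_gt(level)
--         return base + wd_pref[k] - level * w_pref[k]
--
--     answer = 0
--     lo, hi = 1, end_level
--     while lo <= hi:
--         level = (lo + hi) // 2
--         if total_time(level) <= limit:
--             answer = level
--             hi = level - 1
--         else:
--             lo = level + 1
--     return answer
--
--
-- def prefix_sums(xs):
--     res = [0]
--     last = 0
--     for x in xs:
--         last = last + x
--         res.append(last)
--     return res
-- ===== Notes on version B (the rewrite author's own statement) =====
-- stated objective: faster
-- what changed: The O(n) inner feasibility loop rerun at every binary-search probe is replaced by a one-time sort of (difficulty, weight) pairs with prefix sums, so each probe's total time is computed in O(log n) by binary-searching the count of difficulties above the probed level; the outer level search is unchanged, so results agree probe for probe.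
-- outside the precondition, e.g. on solution([-1], [], 5): A returns 0, B raises IndexError
import Mathlib
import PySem

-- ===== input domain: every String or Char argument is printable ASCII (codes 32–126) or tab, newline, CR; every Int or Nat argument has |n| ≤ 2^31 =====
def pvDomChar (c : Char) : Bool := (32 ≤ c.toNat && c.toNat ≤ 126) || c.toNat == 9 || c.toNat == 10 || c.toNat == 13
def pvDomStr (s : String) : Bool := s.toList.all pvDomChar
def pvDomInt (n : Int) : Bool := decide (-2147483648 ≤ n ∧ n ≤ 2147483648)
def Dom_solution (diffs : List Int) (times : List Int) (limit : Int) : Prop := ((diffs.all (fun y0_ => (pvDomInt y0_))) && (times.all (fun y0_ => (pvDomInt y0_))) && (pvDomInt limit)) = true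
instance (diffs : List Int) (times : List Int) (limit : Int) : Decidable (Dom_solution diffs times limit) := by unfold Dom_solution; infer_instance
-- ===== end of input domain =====

-- B replaces A's O(n) inner feasibility loop, rerun at every binary-search probe, by a one-time
-- sort with prefix sums plus an O(log n) binary-searched count per probe; the outer search on the
-- level is unchanged, so both return the same answer.

-- ===== PORT A =====
-- the inner 'for i in range(len(diffs))' loop computing total_time for one level
def solutionTotal (diffs : List Int) (times : List Int) (level : Int) : Int :=
  (PySem.List.pyRange 0 (diffs.length : Int) 1).foldl
    (fun total i =>
      let temp := PySem.List.pyGetD diffs i 0 - level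
      let total := total + PySem.List.pyGetD times i 0
      if temp > 0 then
        total + (PySem.List.pyGetD times (i - 1) 0 + PySem.List.pyGetD times i 0) * temp
      else total)
    0

-- the 'while start_level <= end_level' loop (fuel only bounds the iteration count; the loop
-- itself exits when start_level > end_level, and the supplied fuel always suffices)
def solutionLoop (diffs : List Int) (times : List Int) (limit : Int) :
    Nat → Int → Int → Int → Int
  | 0, _, _, answer => answer
  | fuel + 1, start_level, end_level, answer =>
    if start_level ≤ end_level then
      let level := PySem.Int.floordiv (start_level + end_level) 2
      if solutionTotal diffs times level ≤ limit then
        solutionLoop diffs times limit fuel start_level (level - 1) level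
      else
        solutionLoop diffs times limit fuel (level + 1) end_level answer
    else answer

def solution (diffs : List Int) (times : List Int) (limit : Int) : Int :=
  solutionLoop diffs times limit
    (((PySem.List.max? diffs (fun x => x)).getD 0).toNat + 1)
    1 ((PySem.List.max? diffs (fun x => x)).getD 0) 0

-- ===== PORT B =====
-- prefix_sums helper of Source B
def prefixSums (xs : List Int) : List Int :=
  (xs.foldl (fun (p : List Int × Int) x => (p.1 ++ [p.2 + x], p.2 + x)) ([0], 0)).1

-- count_gt: number of entries of ds (sorted descending) strictly greater than level
-- (fuel bounds the halving steps; hi - lo fuel always suffices)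
def countGt (ds : List Int) (level : Int) : Nat → Nat → Nat → Nat
  | 0, lo, _ => lo
  | fuel + 1, lo, hi =>
    if lo < hi then
      let mid := (lo + hi) / 2
      if ds.getD mid 0 > level then countGt ds level fuel (mid + 1) hi
      else countGt ds level fuel lo mid
    else lo

-- total_time(level) via the precomputed tables
def altTotal (ds wPref wdPref : List Int) (base level : Int) : Int :=
  let k := countGt ds level ds.length 0 ds.length
  base + wdPref.getD k 0 - level * wPref.getD k 0

-- the 'while lo <= hi' loop of Source B (same fuel discipline as solutionLoop)
def altLoop (ds wPref wdPref : List Int) (base limit : Int) :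
    Nat → Int → Int → Int → Int
  | 0, _, _, answer => answer
  | fuel + 1, lo, hi, answer =>
    if lo ≤ hi then
      let level := PySem.Int.floordiv (lo + hi) 2
      if altTotal ds wPref wdPref base level ≤ limit then
        altLoop ds wPref wdPref base limit fuel lo (level - 1) level
      else
        altLoop ds wPref wdPref base limit fuel (level + 1) hi answer
    else answer

def solution_alt (diffs : List Int) (times : List Int) (limit : Int) : Int :=
  let n := diffs.length
  let endLevel := (PySem.List.max? diffs (fun x => x)).getD 0
  let base := (PySem.List.slice times none (some (n : Int))).sum
  let pairs := PySem.List.sorted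
    ((PySem.List.pyRange 0 (n : Int) 1).map
      (fun i => (PySem.List.pyGetD diffs i 0,
                 PySem.List.pyGetD times (i - 1) 0 + PySem.List.pyGetD times i 0)))
    (fun p => p.1) true
  let ds := pairs.map (fun p => p.1)
  let wPref := prefixSums (pairs.map (fun p => p.2))
  let wdPref := prefixSums (pairs.map (fun p => p.1 * p.2))
  altLoop ds wPref wdPref base limit (endLevel.toNat + 1) 1 endLevel 0

-- ===== PRECONDITION & SPEC =====
-- Pre_ excludes empty diffs (both Pythons raise ValueError in max) and times shorter than diffs:
-- there A raises IndexError whenever max(diffs) >= 1, and when max(diffs) <= 0 it returns 0 only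
-- because the level range is empty and times is never touched, while B's upfront weight-table
-- build raises IndexError on such inputs.
def Pre_solution (diffs : List Int) (times : List Int) (limit : Int) : Prop :=
  diffs ≠ [] ∧ diffs.length ≤ times.length
instance (diffs : List Int) (times : List Int) (limit : Int) : Decidable (Pre_solution diffs times limit) := by unfold Pre_solution; infer_instance

def pvWitness_solution : List Int × List Int × Int := ([3, 1, 2], [2, 5, 4], 30)

def Spec_solution (diffs : List Int) (times : List Int) (limit : Int) (out : Int) : Prop := out = solution_alt diffs times limit
instance (diffs : List Int) (times : List Int) (limit : Int) (out : Int) : Decidable (Spec_solution diffs times limit out) := by unfold Spec_solution; infer_instance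

-- ===== CLAIM (what is proved, stated in full; the proofs are below) =====
def Claim_equal_solution : Prop := ∀ (diffs : List Int) (times : List Int) (limit : Int), Dom_solution diffs times limit → Pre_solution diffs times limit → Spec_solution diffs times limit (solution diffs times limit)

-- ===== LEMMAS AND PROOFS =====

-- the (difficulty, weight) pairs in original order, as Source B builds them before sorting
def pairsOf (diffs times : List Int) : List (Int × Int) :=
  (PySem.List.pyRange 0 (diffs.length : Int) 1).map
    (fun i => (PySem.List.pyGetD diffs i 0,
               PySem.List.pyGetD times (i - 1) 0 + PySem.List.pyGetD times i 0))

lemma range_getD_take (xs : List Int) (n : Nat) (hn : n ≤ xs.length) :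
    (List.range n).map (fun j => xs.getD j 0) = xs.take n := by
  apply List.ext_getElem
  · simp [hn]
  · intro i h1 h2
    simp only [List.getElem_map, List.getElem_range, List.getElem_take]
    have hi : i < n := by simpa using h1
    rw [List.getD_eq_getElem xs 0 (by omega)]

-- A's inner loop as base + itemized conditional contributions over the unsorted pairs
lemma totalA_eq (diffs times : List Int) (level : Int) (h : diffs.length ≤ times.length) :
    solutionTotal diffs times level
      = (times.take diffs.length).sum
        + ((pairsOf diffs times).map
            (fun p => if p.1 - level > 0 then p.2 * (p.1 - level) else 0)).sum := by
  unfold solutionTotal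
  have hbody : (fun (total i : Int) =>
      let temp := PySem.List.pyGetD diffs i 0 - level
      let total := total + PySem.List.pyGetD times i 0
      if temp > 0 then
        total + (PySem.List.pyGetD times (i - 1) 0 + PySem.List.pyGetD times i 0) * temp
      else total)
      = (fun (total i : Int) =>
        total + (PySem.List.pyGetD times i 0 +
          if PySem.List.pyGetD diffs i 0 - level > 0 then
            (PySem.List.pyGetD times (i - 1) 0 + PySem.List.pyGetD times i 0) *
              (PySem.List.pyGetD diffs i 0 - level)
          else 0)) := by
    funext total i
    show (if PySem.List.pyGetD diffs i 0 - level > 0 then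
        (total + PySem.List.pyGetD times i 0) +
          (PySem.List.pyGetD times (i - 1) 0 + PySem.List.pyGetD times i 0) *
            (PySem.List.pyGetD diffs i 0 - level)
      else total + PySem.List.pyGetD times i 0) = _
    split_ifs <;> ring
  rw [hbody]
  rw [PySem.List.foldl_add, PySem.List.sum_map_add_int]
  have h1 : (PySem.List.pyRange 0 (diffs.length : Int) 1).map
      (fun i => PySem.List.pyGetD times i 0) = times.take diffs.length := by
    rw [PySem.List.pyRange_zero_natCast, List.map_map]
    have hc : ((fun i => PySem.List.pyGetD times i 0) ∘ fun k : Nat => (k : Int))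
        = fun j : Nat => times.getD j 0 := by
      funext j; simp [PySem.List.pyGetD_natCast]
    rw [hc, range_getD_take times _ h]
  have h2 : (pairsOf diffs times).map
      (fun p => if p.1 - level > 0 then p.2 * (p.1 - level) else 0)
      = (PySem.List.pyRange 0 (diffs.length : Int) 1).map
        (fun i => if PySem.List.pyGetD diffs i 0 - level > 0 then
            (PySem.List.pyGetD times (i - 1) 0 + PySem.List.pyGetD times i 0) *
              (PySem.List.pyGetD diffs i 0 - level)
          else 0) := by
    unfold pairsOf; rw [List.map_map]; rfl
  rw [h1, h2]
  ring

-- on a descending list, being greater than `level` is exactly being among the first countP entries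
lemma prefix_char (level : Int) :
    ∀ (ds : List Int), ds.Pairwise (fun a b => b ≤ a) →
      ∀ j, j < ds.length →
        (level < ds.getD j 0 ↔ j < ds.countP (fun d => decide (level < d))) := by
  intro ds
  induction ds with
  | nil => intro _ j hj; simp at hj
  | cons d t ih =>
    intro hp j hj
    have hd : ∀ b ∈ t, b ≤ d := (List.pairwise_cons.mp hp).1
    have ht := (List.pairwise_cons.mp hp).2
    by_cases hl : level < d
    · rw [List.countP_cons]
      simp only [hl, decide_true, if_true]
      cases j with
      | zero => simp [hl]
      | succ j' =>
        rw [List.getD_cons_succ]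
        have := ih ht j' (by simpa using hj)
        omega
    · have hz : (d :: t).countP (fun d => decide (level < d)) = 0 := by
        apply List.countP_eq_zero.mpr
        intro x hx
        rcases List.mem_cons.mp hx with h1 | h1
        · simp [h1]; omega
        · have := hd x h1; simp; omega
      rw [hz]
      simp only [Nat.not_lt_zero, iff_false]
      cases j with
      | zero => simp; omega
      | succ j' =>
        rw [List.getD_cons_succ]
        have hmem : t.getD j' 0 ∈ t := by
          rw [List.getD_eq_getElem t 0 (by simpa using hj)]
          exact List.getElem_mem _
        have := hd _ hmem
        omega

lemma countGt_eq_aux (ds : List Int) (level : Int) (k : Nat)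
    (hchar : ∀ j, j < ds.length → (level < ds.getD j 0 ↔ j < k)) :
    ∀ (fuel : Nat) (lo hi : Nat), hi - lo ≤ fuel → lo ≤ k → k ≤ hi → hi ≤ ds.length →
      countGt ds level fuel lo hi = k := by
  intro fuel
  induction fuel with
  | zero =>
    intro lo hi hf h1 h2 h3
    simp only [countGt]
    omega
  | succ f ih =>
    intro lo hi hf h1 h2 h3
    simp only [countGt]
    by_cases h : lo < hi
    · simp only [h, if_true]
      have hmid : (lo + hi) / 2 < hi := by omega
      have hmid2 : lo ≤ (lo + hi) / 2 := by omega
      by_cases hc : ds.getD ((lo + hi) / 2) 0 > level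
      · have := (hchar _ (by omega)).mp hc
        simp only [hc, if_pos]
        exact ih _ _ (by omega) (by omega) h2 h3
      · have : ¬ ((lo + hi) / 2 < k) := fun hk => hc ((hchar _ (by omega)).mpr hk)
        simp only [hc, if_neg, not_false_iff]
        exact ih _ _ (by omega) h1 (by omega) (by omega)
    · simp [h]; omega

lemma countGt_eq (ds : List Int) (level : Int) (hp : ds.Pairwise (fun a b => b ≤ a)) :
    countGt ds level ds.length 0 ds.length = ds.countP (fun d => decide (level < d)) :=
  countGt_eq_aux ds level _ (prefix_char level ds hp) ds.length 0 ds.length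
    (by omega) (by omega) List.countP_le_length (by omega)

-- the conditional sum over a descending list is the plain sum over its first countP entries
lemma sum_ite_take (level : Int) :
    ∀ (Q : List (Int × Int)), Q.Pairwise (fun a b => b.1 ≤ a.1) →
      (Q.map (fun p => if p.1 - level > 0 then p.2 * (p.1 - level) else 0)).sum
        = ((Q.take (Q.countP (fun p => decide (level < p.1)))).map
            (fun p => p.2 * (p.1 - level))).sum := by
  intro Q
  induction Q with
  | nil => simp
  | cons q t ih =>
    intro hp
    have hd : ∀ b ∈ t, b.1 ≤ q.1 := (List.pairwise_cons.mp hp).1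
    have ht := (List.pairwise_cons.mp hp).2
    by_cases hq : level < q.1
    · rw [List.countP_cons]
      simp only [hq, decide_true, if_true]
      have hgt : q.1 - level > 0 := by omega
      simp only [List.take_succ_cons, List.map_cons, List.sum_cons, if_pos hgt]
      rw [ih ht]
    · have hz : t.countP (fun p => decide (level < p.1)) = 0 := by
        apply List.countP_eq_zero.mpr
        intro x hx
        have := hd x hx; simp; omega
      rw [List.countP_cons, hz]
      have hng : ¬ (q.1 - level > 0) := by omega
      simp only [hq, decide_false, Bool.false_eq_true, if_false, List.take_zero,
        List.map_nil, List.sum_nil, List.map_cons, List.sum_cons, if_neg hng, zero_add]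
      apply List.sum_eq_zero
      intro x hx
      rcases List.mem_map.mp hx with ⟨p, hpmem, hpe⟩
      have := hd p hpmem
      rw [← hpe, if_neg (by omega)]

lemma scanl_head_tail (c : Int) (t : List Int) :
    List.scanl (· + ·) c t = c :: (List.scanl (· + ·) c t).tail := by
  cases t <;> simp [List.scanl]

lemma prefixSums_aux (xs : List Int) :
    ∀ (acc : List Int) (s : Int),
      (xs.foldl (fun (p : List Int × Int) x => (p.1 ++ [p.2 + x], p.2 + x)) (acc, s)).1
        = acc ++ (List.scanl (· + ·) s xs).tail := by
  induction xs with
  | nil => intro acc s; simp [List.scanl]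
  | cons x t ih =>
    intro acc s
    simp only [List.foldl_cons]
    rw [ih]
    rw [List.scanl_cons, List.tail_cons]
    rw [scanl_head_tail (s + x) t]
    simp

lemma scanl_getD (xs : List Int) :
    ∀ (s : Int) (k : Nat), k ≤ xs.length →
      (List.scanl (· + ·) s xs).getD k 0 = s + (xs.take k).sum := by
  induction xs with
  | nil =>
    intro s k hk
    have : k = 0 := by simpa using hk
    simp [this, List.scanl]
  | cons x t ih =>
    intro s k hk
    rw [List.scanl_cons]
    cases k with
    | zero => simp
    | succ k' =>
      simp only [List.getD, List.getElem?_cons_succ, List.take_succ_cons, List.sum_cons]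
      have := ih (s + x) k' (by simpa using hk)
      simp only [List.getD] at this
      rw [this]
      ring

lemma prefixSums_getD (xs : List Int) (k : Nat) (hk : k ≤ xs.length) :
    (prefixSums xs).getD k 0 = (xs.take k).sum := by
  unfold prefixSums
  rw [prefixSums_aux xs [0] 0]
  have hs := scanl_head_tail 0 xs
  have h1 : ([0] ++ (List.scanl (· + ·) 0 xs).tail).getD k 0
      = (List.scanl (· + ·) 0 xs).getD k 0 := by
    conv_rhs => rw [hs]
    rfl
  rw [h1, scanl_getD xs 0 k hk]
  ring

lemma sum_lin (level : Int) :
    ∀ (l : List (Int × Int)),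
      (l.map (fun p => p.1 * p.2)).sum - level * (l.map (fun p => p.2)).sum
        = (l.map (fun p => p.2 * (p.1 - level))).sum := by
  intro l
  induction l with
  | nil => simp
  | cons q t ih =>
    simp only [List.map_cons, List.sum_cons]
    have : q.2 * (q.1 - level) = q.1 * q.2 - level * q.2 := by ring
    rw [this, ← ih]
    ring

-- pointwise equality of the two per-level feasibility totals
lemma total_eq (diffs times : List Int) (h : diffs.length ≤ times.length) (level : Int) :
    altTotal ((PySem.List.sorted (pairsOf diffs times) (fun p => p.1) true).map (fun p => p.1))
      (prefixSums ((PySem.List.sorted (pairsOf diffs times) (fun p => p.1) true).map (fun p => p.2)))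
      (prefixSums ((PySem.List.sorted (pairsOf diffs times) (fun p => p.1) true).map (fun p => p.1 * p.2)))
      ((PySem.List.slice times none (some (diffs.length : Int))).sum) level
      = solutionTotal diffs times level := by
  set Q := PySem.List.sorted (pairsOf diffs times) (fun p => p.1) true with hQ
  have hpair : Q.Pairwise (fun a b => b.1 ≤ a.1) := PySem.List.sorted_pairwise_rev _ _
  have hds : (Q.map (fun p => p.1)).Pairwise (fun a b => b ≤ a) := by
    rw [List.pairwise_map]; exact hpair
  have hk : countGt (Q.map (fun p => p.1)) level (Q.map (fun p => p.1)).length 0 (Q.map (fun p => p.1)).length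
      = Q.countP (fun p => decide (level < p.1)) := by
    rw [countGt_eq _ _ hds, List.countP_map]; rfl
  have hkle : Q.countP (fun p => decide (level < p.1)) ≤ Q.length := List.countP_le_length
  simp only [altTotal]
  rw [hk]
  rw [prefixSums_getD _ _ (by simpa using hkle), prefixSums_getD _ _ (by simpa using hkle)]
  rw [← List.map_take, ← List.map_take]
  have hbase : (PySem.List.slice times none (some (diffs.length : Int))).sum
      = (times.take diffs.length).sum := by
    rw [PySem.List.slice_to_natCast]
  have hperm : ((pairsOf diffs times).map (fun p => if p.1 - level > 0 then p.2 * (p.1 - level) else 0)).sum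
      = (Q.map (fun p => if p.1 - level > 0 then p.2 * (p.1 - level) else 0)).sum :=
    (List.Perm.sum_eq (List.Perm.map _ (PySem.List.sorted_perm _ _ _))).symm
  rw [totalA_eq diffs times level h, hperm, sum_ite_take level Q hpair,
    ← sum_lin level (Q.take (Q.countP (fun p => decide (level < p.1)))), hbase]
  ring

-- the two outer binary-search loops agree step for step once the totals agree
lemma loop_eq (diffs times ds wPref wdPref : List Int) (base limit : Int)
    (htot : ∀ level, altTotal ds wPref wdPref base level = solutionTotal diffs times level) :
    ∀ (fuel : Nat) (lo hi ans : Int),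
      solutionLoop diffs times limit fuel lo hi ans
        = altLoop ds wPref wdPref base limit fuel lo hi ans := by
  intro fuel
  induction fuel with
  | zero => intro lo hi ans; rfl
  | succ f ih =>
    intro lo hi ans
    simp only [solutionLoop, altLoop, htot]
    by_cases h : lo ≤ hi
    · rw [if_pos h, if_pos h]
      by_cases h2 : solutionTotal diffs times (PySem.Int.floordiv (lo + hi) 2) ≤ limit
      · rw [if_pos h2, if_pos h2]
        exact ih _ _ _
      · rw [if_neg h2, if_neg h2]
        exact ih _ _ _
    · rw [if_neg h, if_neg h]

-- ===== VERDICT (by name: the statement is the Claim_ definition above) =====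
theorem solution_spec : Claim_equal_solution := by
  intro diffs times limit hdom hpre
  unfold Spec_solution
  rcases hpre with ⟨hne, hlen⟩
  unfold solution
  simp only [solution_alt]
  exact loop_eq diffs times _ _ _ _ limit (fun level => total_eq diffs times hlen level)
    ((((PySem.List.max? diffs (fun x => x)).getD 0)).toNat + 1) 1 _ 0
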